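-- pv_equiv track=rewrite | github.com/lucifer-14/steganography-collection | Simple Image Steganography/imagesteg.py | to_binv2
-- ===== SOURCE A (Python) =====
-- def to_binv2(data, passphrase):
--     if isinstance(data, str):
--         # change data to ascii
--         to_ascii = [int(ord(c)) for c in data]
--         # check if passphrase is used
--         if passphrase:
--             # change each letter of passphrase to ascii
--             passphrase = [int(ord(c)) for c in passphrase]
--             passphrase.reverse()
--             counter = 0
--             passphrase_len = len(passphrase)
--             # encode each letter of data using passphrase
--             for i in range(len(to_ascii)):
--                 to_ascii[i] += passphrase[counter]
--                 counter += 1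
--                 if counter == passphrase_len:
--                     counter = 0
--                     passphrase.reverse()
--
--         return ''.join(format(i, "08b") for i in to_ascii)
-- ===== SOURCE B (Python) =====
-- def to_binv2(data, passphrase):
--     if isinstance(data, str):
--         if passphrase:
--             P = [ord(c) for c in passphrase]
--             # keystream has period 2*len(P): one reversed block followed by one original block
--             period = P[::-1] + P
--             stream = period * (len(data) // len(period) + 1)
--             encoded = [ord(c) + k for c, k in zip(data, stream)]
--         else:
--             encoded = [ord(c) for c in data]
--         return ''.join(format(v, "08b") for v in encoded)
-- ===== Notes on version B (the rewrite author's own statement) =====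
-- stated objective: alternative
-- what changed: Replaces A's single in-place pass with a mutable counter and repeated reversals of the passphrase list by two staged passes: first materialize a periodic keystream (reversed key concatenated with the key, repeated by list multiplication), then zip it with the data and add; no element-wise index arithmetic or mutation remains.
import Mathlib
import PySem

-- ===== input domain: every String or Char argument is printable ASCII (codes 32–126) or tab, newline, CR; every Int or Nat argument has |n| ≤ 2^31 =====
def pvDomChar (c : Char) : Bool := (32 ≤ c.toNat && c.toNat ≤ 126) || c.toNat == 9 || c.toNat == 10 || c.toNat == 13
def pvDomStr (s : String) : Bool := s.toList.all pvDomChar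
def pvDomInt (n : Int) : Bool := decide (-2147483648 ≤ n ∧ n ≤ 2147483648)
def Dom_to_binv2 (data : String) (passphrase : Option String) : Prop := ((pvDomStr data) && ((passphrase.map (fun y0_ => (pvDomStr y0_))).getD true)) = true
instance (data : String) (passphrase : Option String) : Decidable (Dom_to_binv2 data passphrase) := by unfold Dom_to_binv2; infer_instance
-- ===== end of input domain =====

-- B replaces A's in-place counter-and-reverse loop with two staged passes: materialize a periodic
-- keystream (reversed key ++ key, repeated), then zip it with the data (alternative decomposition, same cost).

-- format(v, "08b") for both ports: binary digits zero-padded to width 8 (exact: zfill puts the '0's after a sign, like format's 08b)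
def pvBin8 (v : Int) : String := PySem.Str.zfill (PySem.Int.toBin v) 8

-- ===== PORT A =====
-- one step of A's for-loop body: state = (to_ascii, passphrase list, counter); indices are always in range, so getD 0 is exact
def pvStepA (L : Nat) (st : List Int × List Int × Nat) (i : Nat) : List Int × List Int × Nat :=
  let asc := st.1.set i (st.1.getD i 0 + st.2.1.getD st.2.2 0)
  let counter := st.2.2 + 1
  if counter = L then (asc, st.2.1.reverse, 0) else (asc, st.2.1, counter)

def to_binv2 (data : String) (passphrase : Option String) : String :=
  let toAscii : List Int := data.toList.map (fun c => (c.toNat : Int))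
  let toAscii : List Int :=
    match passphrase with
    | none => toAscii
    | some p =>
      if p.toList = [] then toAscii   -- `if passphrase:` — empty string is falsy
      else
        let pa := (p.toList.map (fun c => (c.toNat : Int))).reverse
        ((List.range toAscii.length).foldl (pvStepA pa.length) (toAscii, pa, 0)).1
  PySem.Str.join "" (toAscii.map pvBin8)

-- ===== PORT B =====
def to_binv2_alt (data : String) (passphrase : Option String) : String :=
  let encoded : List Int :=
    match passphrase with
    | none => data.toList.map (fun c => (c.toNat : Int))
    | some p =>
      if p.toList = [] then data.toList.map (fun c => (c.toNat : Int))
      else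
        let P := p.toList.map (fun c => (c.toNat : Int))
        let period := P.reverse ++ P
        -- Python `period * (len(data) // len(period) + 1)` = that many copies concatenated
        let stream := (List.replicate (data.toList.length / period.length + 1) period).flatten
        -- zip truncates to the shorter list, as Python's zip does
        List.zipWith (fun c k => (c.toNat : Int) + k) data.toList stream
  PySem.Str.join "" (encoded.map pvBin8)

-- ===== PRECONDITION & SPEC =====
def Spec_to_binv2 (data : String) (passphrase : Option String) (out : String) : Prop := out = to_binv2_alt data passphrase
instance (data : String) (passphrase : Option String) (out : String) : Decidable (Spec_to_binv2 data passphrase out) := by unfold Spec_to_binv2; infer_instance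

-- ===== CLAIM (what is proved, stated in full; the proofs are below) =====
def Claim_equal_to_binv2 : Prop := ∀ (data : String) (passphrase : Option String), Dom_to_binv2 data passphrase → Spec_to_binv2 data passphrase (to_binv2 data passphrase)

-- ===== LEMMAS AND PROOFS =====

-- the passphrase list A holds after i iterations, and the offset A adds at index i
def pvPassAt (P : List Int) (i : Nat) : List Int :=
  if (i / P.length) % 2 = 0 then P.reverse else P

def pvOff (P : List Int) (i : Nat) : Int := (pvPassAt P i).getD (i % P.length) 0

def pvEnc (P a0 : List Int) : List Int :=
  (List.range a0.length).map (fun j => a0.getD j 0 + pvOff P j)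

lemma pvSuccLt (i L : Nat) (hL : 0 < L) (h : i % L + 1 < L) :
    (i+1)/L = i/L ∧ (i+1)%L = i%L + 1 := by
  have h1 := Nat.div_add_mod i L
  have h2 : i + 1 = L * (i/L) + (i%L+1) := by omega
  refine ⟨?_, ?_⟩
  · rw [h2, Nat.mul_add_div hL, Nat.div_eq_of_lt h, Nat.add_zero]
  · rw [h2, Nat.mul_add_mod, Nat.mod_eq_of_lt h]

lemma pvSuccEq (i L : Nat) (hL : 0 < L) (h : i % L + 1 = L) :
    (i+1)/L = i/L + 1 ∧ (i+1)%L = 0 := by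
  have h1 := Nat.div_add_mod i L
  have h2 : i + 1 = L * (i/L + 1) := by rw [Nat.mul_add, Nat.mul_one]; omega
  refine ⟨?_, ?_⟩
  · rw [h2, Nat.mul_div_cancel_left _ hL]
  · rw [h2, Nat.mul_mod_right]

lemma pvPassAt_succ_eq (P : List Int) (i : Nat) (hP : P ≠ []) (h : i % P.length + 1 = P.length) :
    (pvPassAt P i).reverse = pvPassAt P (i+1) := by
  have hL : 0 < P.length := List.length_pos_of_ne_nil hP
  obtain ⟨hd, hm⟩ := pvSuccEq i P.length hL h
  unfold pvPassAt
  rw [hd]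
  by_cases hpar : (i / P.length) % 2 = 0 <;> simp [hpar] <;> omega

lemma pvLoopA_inv (P a0 : List Int) (hP : P ≠ []) :
    ∀ i, i ≤ a0.length →
      (List.range i).foldl (pvStepA P.length) (a0, P.reverse, 0)
        = ((pvEnc P a0).take i ++ a0.drop i, pvPassAt P i, i % P.length) := by
  have hL : 0 < P.length := List.length_pos_of_ne_nil hP
  intro i
  induction i with
  | zero => intro _; simp [pvPassAt, Nat.zero_div]
  | succ i ih =>
    intro hi1
    have hi : i ≤ a0.length := Nat.le_of_succ_le hi1
    have hilt : i < a0.length := hi1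
    have hencLen : (pvEnc P a0).length = a0.length := by simp [pvEnc]
    have htake : ((pvEnc P a0).take i).length = i := by
      rw [List.length_take, hencLen]; omega
    rw [List.range_succ, List.foldl_append, List.foldl_cons, List.foldl_nil, ih hi]
    have hgetD : ((pvEnc P a0).take i ++ a0.drop i).getD i 0 = a0[i] := by
      rw [List.getD_append_right _ _ _ _ (by omega), htake, Nat.sub_self,
        List.drop_eq_getElem_cons hilt, List.getD_cons_zero]
    have hset : ((pvEnc P a0).take i ++ a0.drop i).set i (a0[i] + pvOff P i)
        = (pvEnc P a0).take (i+1) ++ a0.drop (i+1) := by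
      rw [List.set_append_right _ _ (by omega), htake, Nat.sub_self,
        List.drop_eq_getElem_cons hilt, List.set_cons_zero, List.take_add_one]
      have : (pvEnc P a0)[i]? = some (a0[i] + pvOff P i) := by
        rw [List.getElem?_eq_getElem (by omega)]
        simp [pvEnc, List.getElem_map, List.getElem?_eq_getElem hilt]
      rw [this]
      simp
    have hpassGetD : (pvPassAt P i).getD (i % P.length) 0 = pvOff P i := rfl
    unfold pvStepA
    simp only [hgetD, hpassGetD, hset]
    by_cases h : i % P.length + 1 = P.length
    · obtain ⟨hd, hm⟩ := pvSuccEq i P.length hL h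
      rw [if_pos h, hm, pvPassAt_succ_eq P i hP h]
    · have hlt : i % P.length + 1 < P.length := by
        have := Nat.mod_lt i hL; omega
      obtain ⟨hd, hm⟩ := pvSuccLt i P.length hL hlt
      rw [if_neg h, hm]
      unfold pvPassAt
      rw [hd]

-- n < (n/m + 1) * m for positive m
lemma pvCeil (n m : Nat) (hm : 0 < m) : n < (n/m + 1) * m := by
  have h := Nat.div_add_mod n m
  have h2 : n % m < m := Nat.mod_lt n hm
  have h3 : n / m * m = m * (n / m) := Nat.mul_comm _ _
  rw [Nat.add_mul, Nat.one_mul]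
  omega

-- element k of m concatenated copies of Q is Q's element at k mod |Q|
lemma pvFlattenReplicateGetD (Q : List Int) (m k : Nat) (h : k < m * Q.length) :
    ((List.replicate m Q).flatten).getD k 0 = Q.getD (k % Q.length) 0 := by
  induction m generalizing k with
  | zero => rw [Nat.zero_mul] at h; omega
  | succ m ih =>
    rw [Nat.succ_mul] at h
    have hQ : 0 < Q.length := by
      rcases Nat.eq_zero_or_pos Q.length with h0 | h0
      · rw [h0, Nat.mul_zero] at h; omega
      · exact h0
    rw [List.replicate_succ, List.flatten_cons]
    by_cases hk : k < Q.length
    · rw [List.getD_append _ _ _ _ hk, Nat.mod_eq_of_lt hk]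
    · push Not at hk
      rw [List.getD_append_right _ _ _ _ hk, ih (k - Q.length) (by omega)]
      congr 1
      rw [Nat.mod_eq_sub_mod hk]

-- B's keystream element at index k equals the offset A adds at index k
lemma pvPeriodGetD (P : List Int) (hP : P ≠ []) (k : Nat) :
    (P.reverse ++ P).getD (k % (P.reverse ++ P).length) 0 = pvOff P k := by
  have hL : 0 < P.length := List.length_pos_of_ne_nil hP
  have hlen : (P.reverse ++ P).length = P.length + P.length := by simp
  rw [hlen]
  set L := P.length with hLdef
  have h2 : 0 < L + L := by omega
  have hq : k % (L + L) < L + L := Nat.mod_lt _ h2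
  set r := k % (L + L) with hr
  have hk : k = (L + L) * (k / (L + L)) + r := (Nat.div_add_mod _ _).symm
  have hsplit : (L + L) * (k / (L + L)) = L * (2 * (k / (L + L))) := by ring
  have hdiv : k / L = 2 * (k / (L + L)) + r / L := by
    conv_lhs => rw [hk, hsplit]
    rw [Nat.mul_add_div hL]
  have hmodL : k % L = r % L := by
    conv_lhs => rw [hk, hsplit]
    rw [Nat.mul_add_mod]
  have hpar : k / L % 2 = r / L % 2 := by
    rw [hdiv, Nat.add_comm, Nat.add_mul_mod_self_left]
  unfold pvOff pvPassAt
  by_cases hrL : r < L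
  · have hr0 : r / L = 0 := Nat.div_eq_of_lt hrL
    rw [if_pos (by rw [hpar, hr0])]
    have hrr : k % L = r := by rw [hmodL, Nat.mod_eq_of_lt hrL]
    rw [hrr, List.getD_append _ _ _ _ (by rw [List.length_reverse]; exact hrL)]
  · push Not at hrL
    have hr1 : r / L = 1 := by
      rw [Nat.div_eq_sub_div hL hrL, Nat.div_eq_of_lt (by omega)]
    rw [if_neg (by rw [hpar, hr1]; omega)]
    have hrr : k % L = r - L := by
      rw [hmodL, Nat.mod_eq_sub_mod hrL, Nat.mod_eq_of_lt (by omega)]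
    rw [hrr, List.getD_append_right _ _ _ _ (by rw [List.length_reverse]; exact hrL)]
    congr 1
    rw [List.length_reverse]

-- B's staged zip equals the index-formula encoding
lemma pvAltZip (cs : List Char) (P : List Int) (hP : P ≠ []) :
    List.zipWith (fun c k => ((c.toNat : Int)) + k) cs
        ((List.replicate (cs.length / (P.reverse ++ P).length + 1) (P.reverse ++ P)).flatten)
      = pvEnc P (cs.map (fun c => (c.toNat : Int))) := by
  have hL : 0 < P.length := List.length_pos_of_ne_nil hP
  have hlenQ : (P.reverse ++ P).length = P.length + P.length := by simp
  set Q := P.reverse ++ P with hQdef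
  have hQpos : 0 < Q.length := by omega
  set m := cs.length / Q.length + 1 with hm
  have hkm : cs.length < m * Q.length := pvCeil cs.length Q.length hQpos
  have hstream : cs.length ≤ ((List.replicate m Q).flatten).length := by
    rw [List.length_flatten]
    simp only [List.map_replicate, List.sum_replicate, smul_eq_mul]
    omega
  apply List.ext_getElem
  · rw [List.length_zipWith]
    simp [pvEnc]
    omega
  · intro k hk1 hk2
    have hkcs : k < cs.length := by
      rw [List.length_zipWith] at hk1; omega
    rw [List.getElem_zipWith]
    have hrhs : (pvEnc P (cs.map (fun c => (c.toNat : Int))))[k]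
        = (cs[k].toNat : Int) + pvOff P k := by
      simp [pvEnc, List.getElem_map, List.getD_eq_getElem?_getD, List.getElem?_eq_getElem hkcs]
    rw [hrhs]
    congr 1
    have := pvFlattenReplicateGetD Q m k (by omega)
    rw [List.getD_eq_getElem?_getD, List.getElem?_eq_getElem (by omega)] at this
    simp only [Option.getD_some] at this
    rw [this, hQdef]
    exact pvPeriodGetD P hP k

theorem pv_main (data : String) (passphrase : Option String) :
    to_binv2 data passphrase = to_binv2_alt data passphrase := by
  unfold to_binv2 to_binv2_alt
  cases passphrase with
  | none => rfl
  | some p =>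
    by_cases hp : p.toList = []
    · simp [hp]
    · simp only [hp, reduceIte]
      congr 1
      set cs := data.toList
      set P : List Int := p.toList.map (fun c => (c.toNat : Int)) with hPdef
      have hP : P ≠ [] := by simp [hPdef, hp]
      set a0 : List Int := cs.map (fun c => (c.toNat : Int)) with ha0
      have hlenrev : P.reverse.length = P.length := List.length_reverse
      have hinv := pvLoopA_inv P a0 hP a0.length (le_refl _)
      have hfin : ((pvEnc P a0).take a0.length ++ a0.drop a0.length) = pvEnc P a0 := by
        have : (pvEnc P a0).length = a0.length := by simp [pvEnc]
        rw [List.drop_length, List.take_of_length_le (by omega), List.append_nil]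
      congr 1
      rw [hlenrev, hinv, hfin, ← pvAltZip cs P hP]

-- ===== VERDICT (by name: the statement is the Claim_ definition above) =====
theorem to_binv2_spec : Claim_equal_to_binv2 := by
  intro data passphrase _
  exact pv_main data passphrase
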